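-- pv_equiv track=rewrite | github.com/slomkowski/nginx-config-formatter | nginxfmt.py | _join_opening_bracket
-- ===== SOURCE A (Python) =====
-- def _join_opening_bracket(lines):
--     """When opening curly bracket is in it's own line (K&R convention), it's joined with precluding line (Java)."""
--     modified_lines = []
--     for i in range(len(lines)):
--         if i > 0 and lines[i] == "{":
--             modified_lines[-1] += " {"
--         else:
--             modified_lines.append(lines[i])
--     return modified_lines
-- ===== SOURCE B (Python) =====
-- def _join_opening_bracket(lines):
--     """Backward pass: count pending standalone '{' lines and attach ' {' * count to each kept line."""
--     result = []
--     pending = 0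
--     for line in reversed(lines[1:]):
--         if line == "{":
--             pending += 1
--         else:
--             result.append(line + " {" * pending)
--             pending = 0
--     if lines:
--         result.append(lines[0] + " {" * pending)
--     result.reverse()
--     return result
-- ===== Notes on version B (the rewrite author's own statement) =====
-- stated objective: alternative
-- what changed: Replaces A's forward pass that mutates the previously emitted line with a backward pass over the tail that counts pending standalone '{' lines and attaches ' {'*count to each kept line via string repetition, building the output back-to-front and reversing once.
import Mathlib
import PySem

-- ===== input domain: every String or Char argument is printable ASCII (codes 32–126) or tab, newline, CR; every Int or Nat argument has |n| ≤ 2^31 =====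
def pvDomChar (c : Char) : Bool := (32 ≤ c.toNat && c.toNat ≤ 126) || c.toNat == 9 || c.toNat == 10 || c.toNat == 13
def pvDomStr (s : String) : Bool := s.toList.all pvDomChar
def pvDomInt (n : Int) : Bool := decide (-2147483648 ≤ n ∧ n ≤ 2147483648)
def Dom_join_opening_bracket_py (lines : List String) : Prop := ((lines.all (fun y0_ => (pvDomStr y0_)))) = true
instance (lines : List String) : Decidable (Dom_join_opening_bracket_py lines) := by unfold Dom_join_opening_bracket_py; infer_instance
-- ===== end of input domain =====

-- B replaces A's forward pass (mutate the previously emitted line on seeing a '{') with a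
-- backward pass counting pending '{' lines and attaching " {"*count; alternative decomposition, same cost.

-- ===== PORT A =====
-- A's `for i in range(len(lines))` loop, transliterated as a recursion carrying the index i
-- and the accumulator modified_lines; `modified_lines[-1] += " {"` becomes dropLast ++ [last ++ " {"]
-- (i > 0 guarantees the accumulator is nonempty, so getLast?.getD "" is exact there).
def joinALoop (i : Nat) (xs : List String) (acc : List String) : List String :=
  match xs with
  | [] => acc
  | x :: rest =>
    if i > 0 && x == "{" then
      joinALoop (i + 1) rest (acc.dropLast ++ [acc.getLast?.getD "" ++ " {"])
    else
      joinALoop (i + 1) rest (acc ++ [x])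

def join_opening_bracket_py (lines : List String) : List String :=
  joinALoop 0 lines []

-- ===== PORT B =====
-- port of Python's `" {" * pending` (pending copies of " {"), exact by induction on the count
def repBrace : Nat → String
  | 0 => ""
  | n + 1 => " {" ++ repBrace n

-- one step of B's loop over reversed(lines[1:]), state = (result, pending)
def joinBStep (st : List String × Nat) (line : String) : List String × Nat :=
  if line == "{" then (st.1, st.2 + 1)
  else (st.1 ++ [line ++ repBrace st.2], 0)

def join_opening_bracket_py_alt (lines : List String) : List String :=
  let s := ((lines.drop 1).reverse).foldl joinBStep ([], 0)
  let s2 := match lines with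
    | [] => s.1
    | x :: _ => s.1 ++ [x ++ repBrace s.2]
  s2.reverse

-- ===== PRECONDITION & SPEC =====
def Spec_join_opening_bracket_py (lines : List String) (out : List String) : Prop := out = join_opening_bracket_py_alt lines
instance (lines : List String) (out : List String) : Decidable (Spec_join_opening_bracket_py lines out) := by unfold Spec_join_opening_bracket_py; infer_instance

-- ===== CLAIM (what is proved, stated in full; the proofs are below) =====
def Claim_equal_join_opening_bracket_py : Prop := ∀ (lines : List String), Dom_join_opening_bracket_py lines → Spec_join_opening_bracket_py lines (join_opening_bracket_py lines)

-- ===== LEMMAS AND PROOFS =====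

-- Proof-side middle ground: the merge-then-continue recursion both ports are proved equal to.
def joinBMerge (cur : String) (xs : List String) : String × List String :=
  match xs with
  | "{" :: rest => joinBMerge (cur ++ " {") rest
  | rest => (cur, rest)

theorem joinBMerge_len (cur : String) (xs : List String) :
    (joinBMerge cur xs).2.length ≤ xs.length := by
  induction xs generalizing cur with
  | nil => simp [joinBMerge]
  | cons y rest ih =>
    by_cases h : y = "{"
    · subst h; simpa [joinBMerge] using Nat.le_succ_of_le (ih (cur ++ " {"))
    · simp [joinBMerge, h]

def joinBGo (xs : List String) : List String :=
  match xs with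
  | [] => []
  | x :: rest =>
    let p := joinBMerge x rest
    p.1 :: joinBGo p.2
termination_by xs.length
decreasing_by
  simpa using Nat.lt_succ_of_le (joinBMerge_len x rest)

-- A-side invariant: once the accumulator is nonempty (front ++ [last]) and the index positive,
-- A's loop equals front followed by the merge-then-continue of last over the remaining lines.
theorem joinALoop_eq (xs : List String) :
    ∀ (front : List String) (last : String) (i : Nat),
      joinALoop (i + 1) xs (front ++ [last]) =
        front ++ ((joinBMerge last xs).1 :: joinBGo (joinBMerge last xs).2) := by
  induction xs with
  | nil => intro front last i; simp [joinALoop, joinBMerge, joinBGo]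
  | cons y rest ih =>
    intro front last i
    by_cases h : y = "{"
    · subst h
      simp only [joinALoop, joinBMerge]
      simpa using ih front (last ++ " {") (i + 1)
    · have h2 : (y == "{") = false := by simp [h]
      have hm : joinBMerge last (y :: rest) = (last, y :: rest) := by
        rw [joinBMerge.eq_def]; simp [h]
      have hstep : joinALoop (i + 1) (y :: rest) (front ++ [last]) =
          joinALoop (i + 1 + 1) rest ((front ++ [last]) ++ [y]) := by
        simp [joinALoop, h2]
      rw [hstep, ih (front ++ [last]) y (i + 1), hm]
      simp [joinBGo]

theorem joinA_eq_go (lines : List String) :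
    join_opening_bracket_py lines = joinBGo lines := by
  unfold join_opening_bracket_py
  cases lines with
  | nil => simp [joinALoop, joinBGo]
  | cons x rest =>
    have h0 : joinALoop 0 (x :: rest) [] = joinALoop 1 rest [x] := by
      simp [joinALoop]
    rw [h0]
    have := joinALoop_eq rest [] x 0
    simpa [joinBGo] using this

-- B-side state abbreviation: foldr form of B's foldl over the reversed tail
def joinBFoldr (t : List String) : List String × Nat :=
  t.foldr (fun line st => joinBStep st line) ([], 0)

theorem joinBGo_eq_foldr (t : List String) :
    ∀ x, joinBGo (x :: t) = (x ++ repBrace (joinBFoldr t).2) :: (joinBFoldr t).1.reverse := by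
  induction t with
  | nil =>
    intro x
    simp [joinBGo, joinBMerge, joinBFoldr, repBrace]
  | cons y t' ih =>
    intro x
    by_cases h : y = "{"
    · subst h
      have hF : joinBFoldr ("{" :: t') = ((joinBFoldr t').1, (joinBFoldr t').2 + 1) := by
        simp [joinBFoldr, joinBStep]
      have hGo : joinBGo (x :: "{" :: t') = joinBGo ((x ++ " {") :: t') := by
        rw [joinBGo.eq_def]
        conv_rhs => rw [joinBGo.eq_def]
        simp [joinBMerge]
      rw [hGo, ih (x ++ " {"), hF]
      have : (x ++ " {") ++ repBrace (joinBFoldr t').2 =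
          x ++ repBrace ((joinBFoldr t').2 + 1) := by
        rw [String.append_assoc]; rfl
      rw [this]
    · have hF : joinBFoldr (y :: t') =
          ((joinBFoldr t').1 ++ [y ++ repBrace (joinBFoldr t').2], 0) := by
        simp [joinBFoldr, joinBStep, h]
      have hm : joinBMerge x (y :: t') = (x, y :: t') := by
        rw [joinBMerge.eq_def]; simp [h]
      have hGo : joinBGo (x :: y :: t') = x :: joinBGo (y :: t') := by
        rw [joinBGo.eq_def]; simp [hm]
      rw [hGo, ih y, hF]
      simp [repBrace]

theorem joinB_eq_go (lines : List String) :
    join_opening_bracket_py_alt lines = joinBGo lines := by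
  unfold join_opening_bracket_py_alt
  cases lines with
  | nil => simp [joinBGo]
  | cons x t =>
    have hfold : (List.foldl joinBStep ([], 0) t.reverse) = joinBFoldr t := by
      simp [joinBFoldr, List.foldl_reverse]
    simp only [List.drop_succ_cons, List.drop_zero, hfold]
    rw [joinBGo_eq_foldr t x]
    simp

-- ===== VERDICT (by name: the statement is the Claim_ definition above) =====
theorem join_opening_bracket_py_spec : Claim_equal_join_opening_bracket_py := by
  intro lines _
  unfold Spec_join_opening_bracket_py
  rw [joinA_eq_go, joinB_eq_go]
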